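-- pv_equiv track=rewrite | github.com/JustineDevs/HyperAgent | hyperagent/security/mythril_wrapper.py | _parse_text_output
-- ===== SOURCE A (Python) =====
-- from typing import Dict, Any, List
--
-- def _parse_text_output(output: str) -> List[Dict[str, Any]]:
--     """
--     Parse Mythril text output as fallback
--
--     Concept: Extract issues from text when JSON parsing fails
--     Logic:
--         1. Look for issue patterns in text
--         2. Extract severity and description
--         3. Return formatted vulnerabilities
--     """
--     vulnerabilities = []
--
--     # Simple text parsing (basic implementation)
--     lines = output.split("\n")
--     current_issue = None
--
--     for line in lines:
--         if "Vulnerability:" in line or "Issue:" in line: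
--             if current_issue:
--                 vulnerabilities.append(current_issue)
--             current_issue = {
--                 "severity": "medium",
--                 "title": line.split(":")[-1].strip(),
--                 "description": "",
--                 "tool": "mythril"
--             }
--         elif current_issue and line.strip():
--             current_issue["description"] += line.strip() + " "
--
--     if current_issue:
--         vulnerabilities.append(current_issue)
--
--     return vulnerabilities
-- ===== SOURCE B (Python) =====
-- from typing import Dict, Any, List
--
-- def _parse_text_output(output: str) -> List[Dict[str, Any]]:
--     # Segment-based parse: find header lines, slice the text into
--     # (header, body) segments, then map each segment to its dict.
--     lines = output.split("\n")
--     n = len(lines)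
--
--     def is_header(l):
--         return "Vulnerability:" in l or "Issue:" in l
--
--     i = 0
--     while i < n and not is_header(lines[i]):
--         i += 1  # discard everything before the first header
--
--     result = []
--     while i < n:
--         j = i + 1
--         while j < n and not is_header(lines[j]):
--             j += 1
--         body = lines[i + 1:j]
--         result.append({
--             "severity": "medium",
--             "title": lines[i].split(":")[-1].strip(),
--             "description": "".join(l.strip() + " " for l in body if l.strip()),
--             "tool": "mythril",
--         })
--         i = j
--     return result
-- ===== Notes on version B (the rewrite author's own statement) =====
-- stated objective: alternative
-- what changed: A does one stateful pass mutating a 'current issue' dict (appending to its description field line by line); B first partitions the split lines into (header, body) segments and then maps each segment to its dict, building each description in one join.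
import Mathlib
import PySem

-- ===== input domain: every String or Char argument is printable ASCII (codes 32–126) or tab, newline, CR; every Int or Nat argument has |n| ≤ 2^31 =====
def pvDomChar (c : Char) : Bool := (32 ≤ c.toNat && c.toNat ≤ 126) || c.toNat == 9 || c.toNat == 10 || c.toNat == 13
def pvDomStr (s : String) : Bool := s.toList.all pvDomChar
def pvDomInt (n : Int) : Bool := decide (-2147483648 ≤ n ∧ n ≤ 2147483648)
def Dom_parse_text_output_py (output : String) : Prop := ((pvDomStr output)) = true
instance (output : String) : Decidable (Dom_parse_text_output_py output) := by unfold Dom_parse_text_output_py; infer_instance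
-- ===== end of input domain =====

-- B replaces A's stateful single pass (mutable current-issue dict) by a partition of the
-- lines into (header, body) segments that are then mapped to dicts; same results, same cost.

-- ===== PORT A =====
-- helpers shared with port B: both Python sources contain the very same subexpressions
-- '"Vulnerability:" in line or "Issue:" in line' and 'line.split(":")[-1].strip()'.
def pvIsHdr (l : String) : Bool :=
  PySem.Str.isIn "Vulnerability:" l || PySem.Str.isIn "Issue:" l

-- line.split(":")[-1].strip(); sep ":" is nonempty so split? is some (getD [] unreachable),
-- and the result is never empty so [-1] never raises (getD "" unreachable)
def pvTitle (l : String) : String :=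
  PySem.Str.strip ((PySem.List.pyGet? ((PySem.Str.split? l ":").getD []) (-1)).getD "")

-- the dict literal A builds (description d), insertion order severity, title, description, tool
def pvIssue (l d : String) : List (String × String) :=
  [("severity", "medium"), ("title", pvTitle l), ("description", d), ("tool", "mythril")]

-- the loop body of A's 'for line in lines' (state = (vulnerabilities, current_issue))
def pvAStep (st : List (List (String × String)) × Option (List (String × String)))
    (line : String) : List (List (String × String)) × Option (List (String × String)) :=
  if pvIsHdr line then
    ((match st.2 with | none => st.1 | some c => st.1 ++ [c]), some (pvIssue line ""))
  else
    match st.2 with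
    | none => st
    | some c =>
        if PySem.Str.strip line != "" then
          -- current_issue["description"] += line.strip() + " "  (key exists; in-place update)
          (st.1, some (c.map (fun p =>
            if p.1 = "description" then (p.1, p.2 ++ PySem.Str.strip line ++ " ") else p)))
        else st

def parse_text_output_py (output : String) : List (List (String × String)) :=
  let lines := (PySem.Str.split? output "\n").getD []
  let st := lines.foldl pvAStep ([], none)
  match st.2 with | none => st.1 | some c => st.1 ++ [c]

-- ===== PORT B =====
-- the two inner while loops of Source B: scan forward to the next header; the scanned body
-- lines are the takeWhile, the resumption point the dropWhile (exact index-scan transcription)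
def pvSegments : List String → List (String × List String)
  | [] => []
  | l :: ls =>
      (l, ls.takeWhile (fun x => !pvIsHdr x)) :: pvSegments (ls.dropWhile (fun x => !pvIsHdr x))
  termination_by ls => ls.length
  decreasing_by
    simpa using Nat.lt_succ_of_le (List.length_dropWhile_le _ _)

-- "".join(l.strip() + " " for l in body if l.strip())
def pvDesc (body : List String) : String :=
  PySem.Str.join "" ((body.filter (fun l => PySem.Str.strip l != "")).map
    (fun l => PySem.Str.strip l ++ " "))

def parse_text_output_py_alt (output : String) : List (List (String × String)) :=
  let lines := (PySem.Str.split? output "\n").getD []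
  (pvSegments (lines.dropWhile (fun l => !pvIsHdr l))).map
    (fun seg => [("severity", "medium"), ("title", pvTitle seg.1),
                 ("description", pvDesc seg.2), ("tool", "mythril")])

-- ===== PRECONDITION & SPEC =====
def Spec_parse_text_output_py (output : String) (out : List (List (String × String))) : Prop := out = parse_text_output_py_alt output
instance (output : String) (out : List (List (String × String))) : Decidable (Spec_parse_text_output_py output out) := by unfold Spec_parse_text_output_py; infer_instance

-- ===== CLAIM (what is proved, stated in full; the proofs are below) =====
def Claim_equal_parse_text_output_py : Prop := ∀ (output : String), Dom_parse_text_output_py output → Spec_parse_text_output_py output (parse_text_output_py output)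

-- ===== LEMMAS AND PROOFS =====

theorem pv_join_empty_cons (x : String) (xs : List String) :
    PySem.Str.join "" (x :: xs) = x ++ PySem.Str.join "" xs := by
  cases xs <;> simp [PySem.Str.join, PySem.Chars.join_singleton, PySem.Chars.join_cons_cons]

theorem pvDesc_nil : pvDesc [] = "" := by simp [pvDesc, PySem.Str.join]

theorem pvDesc_cons (l : String) (ls : List String) :
    pvDesc (l :: ls) =
      if PySem.Str.strip l != "" then PySem.Str.strip l ++ " " ++ pvDesc ls else pvDesc ls := by
  by_cases h : PySem.Str.strip l != "" <;>
    simp [pvDesc, h, pv_join_empty_cons, String.append_assoc]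

-- updating the "description" field of A's current dict keeps the pvIssue shape
theorem pv_update_issue (l d s : String) :
    (pvIssue l d).map (fun p =>
        if p.1 = "description" then (p.1, p.2 ++ PySem.Str.strip s ++ " ") else p)
      = pvIssue l (d ++ PySem.Str.strip s ++ " ") := by
  simp [pvIssue, String.append_assoc]

-- A's fold with a live current issue: the body lines up to the next header extend its
-- description; the rest of the lines contribute B's remaining segments
theorem pv_foldA_some (lines : List String) :
    ∀ (acc : List (List (String × String))) (h d : String),
      (match (lines.foldl pvAStep (acc, some (pvIssue h d))).2 with
        | none => (lines.foldl pvAStep (acc, some (pvIssue h d))).1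
        | some c => (lines.foldl pvAStep (acc, some (pvIssue h d))).1 ++ [c])
      = acc ++ [pvIssue h (d ++ pvDesc (lines.takeWhile (fun x => !pvIsHdr x)))]
          ++ (pvSegments (lines.dropWhile (fun x => !pvIsHdr x))).map
              (fun seg => [("severity", "medium"), ("title", pvTitle seg.1),
                           ("description", pvDesc seg.2), ("tool", "mythril")]) := by
  induction lines with
  | nil => intro acc h d; simp [pvSegments, pvDesc_nil]
  | cons l ls ih =>
      intro acc h d
      by_cases hl : pvIsHdr l = true
      · have step : pvAStep (acc, some (pvIssue h d)) l
            = (acc ++ [pvIssue h d], some (pvIssue l "")) := by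
          simp [pvAStep, hl]
        rw [List.foldl_cons, step, ih]
        simp [hl, pvSegments, pvIssue, pvDesc_nil]
      · have hl' : pvIsHdr l = false := by simpa using hl
        by_cases hs : (PySem.Str.strip l != "") = true
        · have step : pvAStep (acc, some (pvIssue h d)) l
              = (acc, some (pvIssue h (d ++ PySem.Str.strip l ++ " "))) := by
            simp only [pvAStep, hl', Bool.false_eq_true, if_false, hs, if_true]
            rw [pv_update_issue h d l]
          rw [List.foldl_cons, step, ih]
          simp [hl', hs, pvDesc_cons, String.append_assoc]
        · have hs' : (PySem.Str.strip l != "") = false := by simpa using hs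
          have step : pvAStep (acc, some (pvIssue h d)) l = (acc, some (pvIssue h d)) := by
            simp [pvAStep, hl', hs']
          rw [List.foldl_cons, step, ih]
          simp [hl', pvDesc_cons, hs']

-- A's fold with no current issue: pre-header lines are discarded
theorem pv_foldA_none (lines : List String) :
    ∀ (acc : List (List (String × String))),
      (match (lines.foldl pvAStep (acc, none)).2 with
        | none => (lines.foldl pvAStep (acc, none)).1
        | some c => (lines.foldl pvAStep (acc, none)).1 ++ [c])
      = acc ++ (pvSegments (lines.dropWhile (fun l => !pvIsHdr l))).map
              (fun seg => [("severity", "medium"), ("title", pvTitle seg.1),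
                           ("description", pvDesc seg.2), ("tool", "mythril")]) := by
  induction lines with
  | nil => intro acc; simp [pvSegments]
  | cons l ls ih =>
      intro acc
      by_cases hl : pvIsHdr l = true
      · have step : pvAStep (acc, none) l = (acc, some (pvIssue l "")) := by
          simp [pvAStep, hl]
        rw [List.foldl_cons, step, pv_foldA_some]
        simp [hl, pvSegments, pvIssue]
      · have hl' : pvIsHdr l = false := by simpa using hl
        have step : pvAStep (acc, none) l = (acc, none) := by
          simp [pvAStep, hl']
        rw [List.foldl_cons, step, ih]
        simp [hl']

-- ===== VERDICT (by name: the statement is the Claim_ definition above) =====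
theorem parse_text_output_py_spec : Claim_equal_parse_text_output_py := by
  intro output _
  unfold Spec_parse_text_output_py parse_text_output_py parse_text_output_py_alt
  simpa using pv_foldA_none ((PySem.Str.split? output "\n").getD []) []
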